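-- pv_equiv track=rewrite | github.com/TadeuszSikorski/advent_of_code_in_python | 2021/03/solution.py | count_gamma_rate
-- ===== SOURCE A (Python) =====
-- def _count_rate(report):
--     counters = {}
--
--     for numbers in report:
--         position = 0
--
--         while position < len(numbers):
--             if (position, 0) not in counters.keys():
--                 counters[(position, 0)] = 0
--
--             if (position, 1) not in counters.keys():
--                 counters[(position, 1)] = 0
--
--             if numbers[position] == "0":
--                 counters[(position, 0)] += 1
--             else:
--                 counters[(position, 1)] += 1
--
--             position += 1
--
--     return counters
--
-- def count_gamma_rate(report):
--     gamma_rate = ""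
--     counters = _count_rate(report)
--
--     for position in range(0, len(report[0])):
--         if counters[(position, 0)] < counters[(position, 1)]:
--             gamma_rate += "1"
--         else:
--             gamma_rate += "0"
--
--     return gamma_rate
-- ===== SOURCE B (Python) =====
-- def count_gamma_rate(report):
--     width = len(report[0])
--     bits = []
--     for position in range(width):
--         column = [n[position] for n in report if position < len(n)]
--         zeros = column.count("0")
--         bits.append("1" if len(column) - zeros > zeros else "0")
--     return "".join(bits)
-- ===== Notes on version B (the rewrite author's own statement) =====
-- stated objective: simpler
-- what changed: B drops the (position,bit)-keyed counter dict entirely and computes each gamma bit directly from its column (count '0' chars at that position vs the rest), joining the bits at the end; no dict is built or probed.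
import Mathlib
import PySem

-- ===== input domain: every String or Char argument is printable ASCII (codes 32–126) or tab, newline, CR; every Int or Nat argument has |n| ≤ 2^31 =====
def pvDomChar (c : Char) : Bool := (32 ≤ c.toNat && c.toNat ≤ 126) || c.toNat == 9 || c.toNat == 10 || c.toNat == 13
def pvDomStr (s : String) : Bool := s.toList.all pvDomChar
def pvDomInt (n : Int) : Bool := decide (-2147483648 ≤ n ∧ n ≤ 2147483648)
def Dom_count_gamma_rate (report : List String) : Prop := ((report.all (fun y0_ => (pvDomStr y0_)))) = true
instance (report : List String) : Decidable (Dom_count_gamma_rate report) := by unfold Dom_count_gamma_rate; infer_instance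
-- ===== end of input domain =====

-- B replaces A's dict of (position, bit) counters by direct per-position column counts (simpler decomposition, same cost class).

-- ===== PORT A =====
-- the body of A's 'while position < len(numbers)' loop, step for step (strings as char lists)
def pvRateRow (cs : List Char) (position : Nat)
    (counters : PySem.Dict (Int × Int) Int) : PySem.Dict (Int × Int) Int :=
  match cs with
  | [] => counters
  | c :: rest =>
    let d1 := if counters.contains ((position : Int), 0) then counters
              else counters.insert ((position : Int), 0) 0
    let d2 := if d1.contains ((position : Int), 1) then d1
              else d1.insert ((position : Int), 1) 0
    let d3 := if c = '0' then d2.modify ((position : Int), 0) 0 (· + 1)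
              else d2.modify ((position : Int), 1) 0 (· + 1)
    pvRateRow rest (position + 1) d3

-- _count_rate
def pvCountRate (report : List String) : PySem.Dict (Int × Int) Int :=
  report.foldl (fun counters numbers => pvRateRow numbers.toList 0 counters) PySem.Dict.empty

def count_gamma_rate (report : List String) : String :=
  match PySem.List.pyGet? report 0 with
  | none => ""   -- report[0] raises IndexError: excluded by Pre_
  | some first =>
    let counters := pvCountRate report
    -- counters[(position, b)]: the key always exists for position < len(report[0]) (row 0 created it)
    String.ofList ((PySem.List.pyRange 0 (PySem.Str.len first) 1).foldl
      (fun gamma position =>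
        if counters.getD (position, 0) 0 < counters.getD (position, 1) 0
        then gamma ++ ['1'] else gamma ++ ['0']) [])

-- ===== PORT B =====
def count_gamma_rate_alt (report : List String) : String :=
  match report.head? with
  | none => ""   -- len(report[0]) raises IndexError: excluded by Pre_
  | some first =>
    let width := first.toList.length
    let bits := (List.range width).map (fun position =>
      let column := report.filterMap (fun n => (n.toList)[position]?)
      let zeros := column.count '0'
      if column.length - zeros > zeros then "1" else "0")
    PySem.Str.join "" bits

-- ===== PRECONDITION & SPEC =====
-- Pre_ excludes only the empty list, on which both A and B raise IndexError at report[0].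
def Pre_count_gamma_rate (report : List String) : Prop := report ≠ []
instance (report : List String) : Decidable (Pre_count_gamma_rate report) := by
  unfold Pre_count_gamma_rate; infer_instance
def pvWitness_count_gamma_rate : List String := ["0110", "1010", "1110"]

def Spec_count_gamma_rate (report : List String) (out : String) : Prop := out = count_gamma_rate_alt report
instance (report : List String) (out : String) : Decidable (Spec_count_gamma_rate report out) := by unfold Spec_count_gamma_rate; infer_instance

-- ===== CLAIM (what is proved, stated in full; the proofs are below) =====
def Claim_equal_count_gamma_rate : Prop := ∀ (report : List String), Dom_count_gamma_rate report → Pre_count_gamma_rate report → Spec_count_gamma_rate report (count_gamma_rate report)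

-- ===== LEMMAS AND PROOFS =====

-- contribution of one row (scanned from start position q) to counter (p, 0) resp. (p, 1)
def pvHit0 (cs : List Char) (q p : Nat) : Int :=
  if q ≤ p then (match cs[p - q]? with | some c => if c = '0' then 1 else 0 | none => 0) else 0

def pvHit1 (cs : List Char) (q p : Nat) : Int :=
  if q ≤ p then (match cs[p - q]? with | some c => if c = '0' then 0 else 1 | none => 0) else 0

theorem pvGetD_insert_zero (e : PySem.Dict (Int × Int) Int) (k : Int × Int) (q0 : Int × Int) :
    ((if e.contains q0 then e else e.insert q0 0)).getD k 0 = e.getD k 0 := by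
  split_ifs with h
  · rfl
  · rw [PySem.Dict.getD_insert]
    split_ifs with hk
    · subst hk
      rw [PySem.Dict.getD_of_not_contains e _ (by simpa using h)]
    · rfl

theorem pvHit0_cons_self (c : Char) (rest : List Char) (p : Nat) :
    pvHit0 (c :: rest) p p = if c = '0' then 1 else 0 := by simp [pvHit0]

theorem pvHit1_cons_self (c : Char) (rest : List Char) (p : Nat) :
    pvHit1 (c :: rest) p p = if c = '0' then 0 else 1 := by simp [pvHit1]

theorem pvHit0_start_gt (cs : List Char) (q p : Nat) (h : p < q) : pvHit0 cs q p = 0 := by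
  simp [pvHit0, Nat.not_le.mpr h]

theorem pvHit1_start_gt (cs : List Char) (q p : Nat) (h : p < q) : pvHit1 cs q p = 0 := by
  simp [pvHit1, Nat.not_le.mpr h]

theorem pvHit0_cons_ne (c : Char) (rest : List Char) (q p : Nat) (h : p ≠ q) :
    pvHit0 (c :: rest) q p = pvHit0 rest (q + 1) p := by
  unfold pvHit0
  rcases Nat.lt_or_ge p q with hlt | hge
  · rw [if_neg (by omega), if_neg (by omega)]
  · rw [if_pos hge, if_pos (by omega)]
    have : p - q = (p - (q + 1)) + 1 := by omega
    rw [this]; simp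

theorem pvHit1_cons_ne (c : Char) (rest : List Char) (q p : Nat) (h : p ≠ q) :
    pvHit1 (c :: rest) q p = pvHit1 rest (q + 1) p := by
  unfold pvHit1
  rcases Nat.lt_or_ge p q with hlt | hge
  · rw [if_neg (by omega), if_neg (by omega)]
  · rw [if_pos hge, if_pos (by omega)]
    have : p - q = (p - (q + 1)) + 1 := by omega
    rw [this]; simp

theorem pvRateRow_getD0 (cs : List Char) (q : Nat) (d : PySem.Dict (Int × Int) Int) (p : Nat) :
    (pvRateRow cs q d).getD ((p : Int), 0) 0 = d.getD ((p : Int), 0) 0 + pvHit0 cs q p := by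
  induction cs generalizing q d with
  | nil => simp [pvRateRow, pvHit0]
  | cons c rest ih =>
    show (pvRateRow rest (q+1) _).getD _ _ = _
    rw [ih, apply_ite (fun e : PySem.Dict (Int × Int) Int => e.getD ((p:Int), 0) 0),
        PySem.Dict.getD_modify, PySem.Dict.getD_modify]
    simp only [pvGetD_insert_zero]
    by_cases hpq : p = q
    · subst hpq
      rw [pvHit0_cons_self, pvHit0_start_gt rest (p+1) p (by omega)]
      split_ifs with hc <;> simp_all
    · rw [pvHit0_cons_ne c rest q p hpq]
      split_ifs with hc <;> simp_all [Prod.ext_iff]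

theorem pvRateRow_getD1 (cs : List Char) (q : Nat) (d : PySem.Dict (Int × Int) Int) (p : Nat) :
    (pvRateRow cs q d).getD ((p : Int), 1) 0 = d.getD ((p : Int), 1) 0 + pvHit1 cs q p := by
  induction cs generalizing q d with
  | nil => simp [pvRateRow, pvHit1]
  | cons c rest ih =>
    show (pvRateRow rest (q+1) _).getD _ _ = _
    rw [ih, apply_ite (fun e : PySem.Dict (Int × Int) Int => e.getD ((p:Int), 1) 0),
        PySem.Dict.getD_modify, PySem.Dict.getD_modify]
    simp only [pvGetD_insert_zero]
    by_cases hpq : p = q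
    · subst hpq
      rw [pvHit1_cons_self, pvHit1_start_gt rest (p+1) p (by omega)]
      split_ifs with hc <;> simp_all
    · rw [pvHit1_cons_ne c rest q p hpq]
      split_ifs with hc <;> simp_all [Prod.ext_iff]

theorem pvHit0_zero (cs : List Char) (p : Nat) :
    pvHit0 cs 0 p = (match cs[p]? with | some c => if c = '0' then 1 else 0 | none => 0) := by
  simp [pvHit0]

theorem pvHit1_zero (cs : List Char) (p : Nat) :
    pvHit1 cs 0 p = (match cs[p]? with | some c => if c = '0' then 0 else 1 | none => 0) := by
  simp [pvHit1]

theorem pvCountRate_aux (report : List String) (d : PySem.Dict (Int × Int) Int) (p : Nat) :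
    (report.foldl (fun c n => pvRateRow n.toList 0 c) d).getD ((p : Int), 0) 0
        = d.getD ((p : Int), 0) 0
          + ((report.filterMap (fun n => (n.toList)[p]?)).count '0' : Int)
      ∧
    (report.foldl (fun c n => pvRateRow n.toList 0 c) d).getD ((p : Int), 1) 0
        = d.getD ((p : Int), 1) 0
          + ((report.filterMap (fun n => (n.toList)[p]?)).countP (fun c => !(c = '0')) : Int) := by
  induction report generalizing d with
  | nil => simp
  | cons n rest ih =>
    simp only [List.foldl_cons, List.filterMap_cons]
    obtain ⟨ih0, ih1⟩ := ih (pvRateRow n.toList 0 d)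
    rw [ih0, ih1, pvRateRow_getD0, pvRateRow_getD1, pvHit0_zero, pvHit1_zero]
    constructor
    · cases h : (n.toList)[p]? with
      | none => simp
      | some c =>
        by_cases hc : c = '0' <;> simp [hc] <;> ring
    · cases h : (n.toList)[p]? with
      | none => simp
      | some c =>
        by_cases hc : c = '0' <;> simp [hc] <;> ring

theorem pvJoin_singletons (cs : List Char) :
    PySem.Str.join "" (cs.map (fun c => String.ofList [c])) = String.ofList cs := by
  have h2 : (String.toList ∘ fun c => String.ofList [c]) = fun c : Char => [c] := by
    funext c; simp
  have h3 : (PySem.Str.join "" (cs.map (fun c => String.ofList [c]))).toList = cs := by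
    rw [PySem.Str.toList_join]
    rw [List.map_map, h2]
    have he : ("".toList : List Char) = [] := rfl
    rw [he, PySem.Chars.join_nil_singletons]
  calc PySem.Str.join "" (cs.map (fun c => String.ofList [c]))
      = String.ofList ((PySem.Str.join "" (cs.map (fun c => String.ofList [c]))).toList) := String.ofList_toList.symm
    _ = String.ofList cs := by rw [h3]

theorem pvLen_split (l : List Char) :
    l.length = l.countP (fun c => !(c = '0')) + l.count '0' := by
  induction l with
  | nil => rfl
  | cons c t ih =>
    by_cases hc : c = '0' <;> simp [hc, ih] <;> omega

-- ===== VERDICT (by name: the statement is the Claim_ definition above) =====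
theorem count_gamma_rate_spec : Claim_equal_count_gamma_rate := by
  intro report _ hpre
  unfold Spec_count_gamma_rate
  obtain ⟨first, rest, rfl⟩ := List.exists_cons_of_ne_nil hpre
  rw [count_gamma_rate, count_gamma_rate_alt]
  simp only [PySem.List.pyGet?_zero_cons, List.head?_cons, PySem.Str.len_eq,
    PySem.List.pyRange_zero_natCast, List.foldl_map]
  have hfun : (fun (gamma : List Char) (i : Nat) =>
      if (pvCountRate (first :: rest)).getD ((i : Int), 0) 0
          < (pvCountRate (first :: rest)).getD ((i : Int), 1) 0
      then gamma ++ ['1'] else gamma ++ ['0'])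
      = fun (gamma : List Char) (i : Nat) =>
          gamma ++ [if (pvCountRate (first :: rest)).getD ((i : Int), 0) 0
            < (pvCountRate (first :: rest)).getD ((i : Int), 1) 0 then '1' else '0'] := by
    funext g i; split_ifs <;> rfl
  rw [hfun, PySem.List.foldl_append_singleton_eq_map]
  have hbits : ((List.range first.toList.length).map (fun position =>
      let column := (first :: rest).filterMap (fun n => (n.toList)[position]?)
      let zeros := column.count '0'
      if column.length - zeros > zeros then "1" else "0"))
    = ((List.range first.toList.length).map (fun position =>
      let column := (first :: rest).filterMap (fun n => (n.toList)[position]?)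
      let zeros := column.count '0'
      if column.length - zeros > zeros then '1' else '0')).map (fun c => String.ofList [c]) := by
    rw [List.map_map]
    refine List.map_congr_left (fun p _ => ?_)
    simp only [Function.comp]
    split_ifs <;> rfl
  rw [hbits, pvJoin_singletons]
  simp only [List.nil_append]
  refine congrArg String.ofList (List.map_congr_left (fun p _ => ?_))
  have h0 := (pvCountRate_aux (first :: rest) PySem.Dict.empty p).1
  have h1 := (pvCountRate_aux (first :: rest) PySem.Dict.empty p).2
  simp only [PySem.Dict.getD_empty, zero_add] at h0 h1
  show (if (pvCountRate (first :: rest)).getD ((p : Int), 0) 0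
          < (pvCountRate (first :: rest)).getD ((p : Int), 1) 0 then '1' else '0') = _
  rw [show pvCountRate (first :: rest)
        = (first :: rest).foldl (fun c n => pvRateRow n.toList 0 c) PySem.Dict.empty from rfl,
     h0, h1]
  refine if_congr ?_ rfl rfl
  have hlen := pvLen_split ((first :: rest).filterMap (fun n => (n.toList)[p]?))
  omega
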